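-- pv_equiv track=rewrite | github.com/jamie314159/cubes | cubes.py | clock
-- ===== SOURCE A (Python) =====
-- CW = 1
--
-- CCW = -1
--
-- N 	= 0
--
-- NW 	= 7
--
-- def clock(orientation, direction, num = 1):
-- 	while num > 0:
-- 		if direction == CW:
-- 			if orientation == NW:
-- 				orientation = N
-- 			else:
-- 				orientation = orientation+1
-- 		elif direction == CCW:
-- 			if orientation == N:
-- 				orientation = NW
-- 			else:
-- 				orientation = orientation-1
-- 		num -= 1
-- 	return orientation
-- ===== SOURCE B (Python) =====
-- def clock(orientation, direction, num=1):
--     # Rotating one of 8 compass orientations: O(1) modular arithmetic.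
--     if direction in (1, -1) and num > 0:
--         return (orientation + direction * num) % 8
--     return orientation
-- ===== Notes on version B (the rewrite author's own statement) =====
-- stated objective: faster
-- what changed: B replaces A's one-step-at-a-time rotation loop with a single modular-arithmetic formula; Pre_ excludes out-of-range orientations (outside the natural domain 0-7) on calls that actually rotate, where A's stepping never reaches its wrap point and returns unwrapped out-of-range values.
-- outside the precondition, e.g. on clock(8, 1, 1): A returns 9, B returns 1; on clock(-1, -1, 2): A returns -3, B returns 5
import Mathlib
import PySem

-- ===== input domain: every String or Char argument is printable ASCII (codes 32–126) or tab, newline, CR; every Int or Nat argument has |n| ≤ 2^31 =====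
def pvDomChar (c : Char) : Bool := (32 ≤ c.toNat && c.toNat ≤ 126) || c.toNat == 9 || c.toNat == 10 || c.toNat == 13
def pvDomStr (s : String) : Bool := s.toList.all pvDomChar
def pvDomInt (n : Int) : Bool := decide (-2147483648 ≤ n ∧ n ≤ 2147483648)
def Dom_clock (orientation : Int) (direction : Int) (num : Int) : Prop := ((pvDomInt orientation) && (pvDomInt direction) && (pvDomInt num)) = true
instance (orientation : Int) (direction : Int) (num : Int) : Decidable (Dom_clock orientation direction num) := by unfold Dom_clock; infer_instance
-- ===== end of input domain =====

-- B replaces A's one-step-at-a-time rotation loop with a single O(1) modular formula;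
-- proved equal to A on the natural domain of orientations 0–7 (Pre_).

-- ===== PORT A =====
-- one iteration of A's while-body (branches in A's order)
def clockStep (orientation : Int) (direction : Int) : Int :=
  if direction = 1 then (if orientation = 7 then 0 else orientation + 1)
  else if direction = -1 then (if orientation = 0 then 7 else orientation - 1)
  else orientation

-- A's `while num > 0` loop: runs exactly max(num,0) times, num decreasing by 1
def clockLoop (orientation : Int) (direction : Int) : Nat → Int
  | 0 => orientation
  | n + 1 => clockLoop (clockStep orientation direction) direction n

def clock (orientation : Int) (direction : Int) (num : Int) : Int :=
  clockLoop orientation direction num.toNat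

-- ===== PORT B =====
def clock_alt (orientation : Int) (direction : Int) (num : Int) : Int :=
  if (direction = 1 ∨ direction = -1) ∧ 0 < num then
    PySem.Int.mod (orientation + direction * num) 8
  else orientation

-- ===== PRECONDITION & SPEC =====
-- Pre_ excludes out-of-range orientations (outside the natural domain 0–7) on calls that
-- actually rotate (direction = ±1, num > 0): there A's stepping never reaches its single
-- wrap point and returns unwrapped out-of-range values that are an artefact of the
-- implementation; non-rotating calls are admitted for any orientation.
def Pre_clock (orientation : Int) (direction : Int) (num : Int) : Prop :=
  (0 ≤ orientation ∧ orientation ≤ 7) ∨ num ≤ 0 ∨ (direction ≠ 1 ∧ direction ≠ -1)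
instance (orientation : Int) (direction : Int) (num : Int) : Decidable (Pre_clock orientation direction num) := by unfold Pre_clock; infer_instance

def pvWitness_clock : Int × Int × Int := (3, 1, 5)

def Spec_clock (orientation : Int) (direction : Int) (num : Int) (out : Int) : Prop := out = clock_alt orientation direction num
instance (orientation : Int) (direction : Int) (num : Int) (out : Int) : Decidable (Spec_clock orientation direction num out) := by unfold Spec_clock; infer_instance

-- ===== CLAIM =====
def Claim_equal_clock : Prop := ∀ (orientation : Int) (direction : Int) (num : Int), Dom_clock orientation direction num → Pre_clock orientation direction num → Spec_clock orientation direction num (clock orientation direction num)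

-- ===== LEMMAS AND PROOFS =====

theorem clockLoop_other (d : Int) (h1 : d ≠ 1) (h2 : d ≠ -1) :
    ∀ (n : Nat) (o : Int), clockLoop o d n = o := by
  intro n
  induction n with
  | zero => intro o; rfl
  | succ m ih => intro o; simp [clockLoop, clockStep, h1, h2, ih]

theorem clockLoop_cw : ∀ (n : Nat) (o : Int), 0 ≤ o → o ≤ 7 →
    clockLoop o 1 n = (o + n) % 8 := by
  intro n
  induction n with
  | zero => intro o h0 h7; simp [clockLoop]; omega
  | succ m ih =>
    intro o h0 h7
    rw [clockLoop, clockStep]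
    norm_num
    by_cases hc : o = 7
    · subst hc
      norm_num
      rw [ih 0 (by omega) (by omega)]
      push_cast
      omega
    · simp only [if_neg hc]
      rw [ih (o + 1) (by omega) (by omega)]
      push_cast
      ring_nf
  
theorem clockLoop_ccw : ∀ (n : Nat) (o : Int), 0 ≤ o → o ≤ 7 →
    clockLoop o (-1) n = (o - n) % 8 := by
  intro n
  induction n with
  | zero => intro o h0 h7; simp [clockLoop]; omega
  | succ m ih =>
    intro o h0 h7
    rw [clockLoop, clockStep]
    norm_num
    by_cases hc : o = 0
    · subst hc
      norm_num
      rw [ih 7 (by omega) (by omega)]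
      push_cast
      omega
    · simp only [if_neg hc]
      rw [ih (o - 1) (by omega) (by omega)]
      push_cast
      ring_nf

-- ===== VERDICT =====
theorem clock_spec : Claim_equal_clock := by
  intro o d num _ hpre
  unfold Spec_clock clock clock_alt
  by_cases hn : 0 < num
  · have hnum : (num.toNat : Int) = num := by omega
    by_cases hd1 : d = 1
    · subst hd1
      have hb : 0 ≤ o ∧ o ≤ 7 := by
        rcases hpre with h | h | ⟨h, _⟩ <;> first | exact h | omega | simp at h
      rw [if_pos ⟨Or.inl rfl, hn⟩, clockLoop_cw _ o hb.1 hb.2, hnum,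
        PySem.Int.mod_eq_emod_of_pos (by norm_num)]
      ring_nf
    · by_cases hd2 : d = -1
      · subst hd2
        have hb : 0 ≤ o ∧ o ≤ 7 := by
          rcases hpre with h | h | ⟨_, h⟩ <;> first | exact h | omega | simp at h
        rw [if_pos ⟨Or.inr rfl, hn⟩, clockLoop_ccw _ o hb.1 hb.2, hnum,
          PySem.Int.mod_eq_emod_of_pos (by norm_num)]
        ring_nf
      · rw [clockLoop_other d hd1 hd2,
          if_neg (by rintro ⟨(h | h), -⟩ <;> [exact hd1 h; exact hd2 h])]
  · have h0n : num.toNat = 0 := by omega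
    rw [h0n, if_neg (by rintro ⟨-, h⟩; omega)]
    rfl
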